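-- pv_equiv track=rewrite | github.com/patison5/Algorithms | Python/Interviews/yandex_interview_1.py | get_minimum_sum
-- ===== SOURCE A (Python) =====
-- def get_minimum_sum(nums: list) -> int:
-- 	sum = 2**31
-- 	for i in range(len(nums)):
-- 		for j in range(len(nums)):
-- 			if i == j:
-- 				continue
-- 			mult = nums[j] * nums[i]
-- 			if mult < sum:
-- 				sum = mult
-- 	return sum
-- ===== SOURCE B (Python) =====
-- def get_minimum_sum(nums: list) -> int:
--     if len(nums) < 2:
--         return 2**31
--     s = sorted(nums)
--     return min(2**31, s[0]*s[1], s[-1]*s[-2], s[0]*s[-1])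
-- ===== Notes on version B (the rewrite author's own statement) =====
-- stated objective: faster
-- what changed: Replaces the O(n^2) all-pairs scan by sorting once and taking the minimum of the three extreme-pair products (two smallest, two largest, smallest*largest), still capped by the 2**31 sentinel.
import Mathlib
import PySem

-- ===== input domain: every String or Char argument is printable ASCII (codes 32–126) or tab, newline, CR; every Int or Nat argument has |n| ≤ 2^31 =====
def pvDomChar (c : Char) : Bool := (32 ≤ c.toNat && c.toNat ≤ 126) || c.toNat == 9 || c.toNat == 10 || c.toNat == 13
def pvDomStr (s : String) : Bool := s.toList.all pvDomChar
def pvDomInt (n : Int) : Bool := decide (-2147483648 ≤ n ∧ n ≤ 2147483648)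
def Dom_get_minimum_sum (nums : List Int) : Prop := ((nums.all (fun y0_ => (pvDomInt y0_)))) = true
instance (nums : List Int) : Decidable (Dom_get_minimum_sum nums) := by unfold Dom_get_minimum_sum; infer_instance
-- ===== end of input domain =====

-- B replaces A's O(n^2) all-pairs scan by one sort and the minimum of the three extreme-pair
-- products (two smallest, two largest, smallest*largest), keeping A's 2**31 sentinel cap.

-- ===== PORT A =====
def get_minimum_sum (nums : List Int) : Int :=
  (PySem.List.pyRange 0 (nums.length : Int) 1).foldl
    (fun s i =>
      (PySem.List.pyRange 0 (nums.length : Int) 1).foldl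
        (fun s j =>
          if i == j then s
          else
            let mult := PySem.List.pyGetD nums j 0 * PySem.List.pyGetD nums i 0
            if mult < s then mult else s) s)
    (2 ^ 31)

-- ===== PORT B =====
def get_minimum_sum_alt (nums : List Int) : Int :=
  if nums.length < 2 then 2 ^ 31
  else
    let s := PySem.List.sorted nums (fun x => x) false
    min (min (min (2 ^ 31) (PySem.List.pyGetD s 0 0 * PySem.List.pyGetD s 1 0))
             (PySem.List.pyGetD s (-1) 0 * PySem.List.pyGetD s (-2) 0))
        (PySem.List.pyGetD s 0 0 * PySem.List.pyGetD s (-1) 0)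

-- ===== PRECONDITION & SPEC =====
def Spec_get_minimum_sum (nums : List Int) (out : Int) : Prop := out = get_minimum_sum_alt nums
instance (nums : List Int) (out : Int) : Decidable (Spec_get_minimum_sum nums out) := by unfold Spec_get_minimum_sum; infer_instance

-- ===== CLAIM (what is proved, stated in full; the proofs are below) =====
def Claim_equal_get_minimum_sum : Prop := ∀ (nums : List Int), Dom_get_minimum_sum nums → Spec_get_minimum_sum nums (get_minimum_sum nums)

-- ===== LEMMAS AND PROOFS =====

-- the product A forms from indices i (outer) and j (inner)
def pvG (nums : List Int) (i j : Int) : Int :=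
  PySem.List.pyGetD nums j 0 * PySem.List.pyGetD nums i 0

-- A's inner loop over an arbitrary index list
def pvInner (nums : List Int) (i : Int) (l : List Int) (s : Int) : Int :=
  l.foldl (fun s j => if i == j then s
    else if pvG nums i j < s then pvG nums i j else s) s

-- A's outer loop over an arbitrary index list
def pvOuter (nums : List Int) (l : List Int) (s : Int) : Int :=
  l.foldl (fun s i => pvInner nums i (PySem.List.pyRange 0 (nums.length : Int) 1) s) s

-- the sorted copy B works on
def pvS (nums : List Int) : List Int := PySem.List.sorted nums (fun x => x) false

lemma pv_A_eq_outer (nums : List Int) :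
    get_minimum_sum nums
      = pvOuter nums (PySem.List.pyRange 0 (nums.length : Int) 1) (2 ^ 31) := rfl

lemma pv_inner_spec (nums : List Int) (i : Int) (l : List Int) (s : Int) :
    pvInner nums i l s ≤ s ∧
    (∀ j ∈ l, j ≠ i → pvInner nums i l s ≤ pvG nums i j) ∧
    (pvInner nums i l s = s ∨ ∃ j ∈ l, j ≠ i ∧ pvInner nums i l s = pvG nums i j) := by
  induction l generalizing s with
  | nil => simp [pvInner]
  | cons x t ih =>
    have step : pvInner nums i (x :: t) s
        = pvInner nums i t (if i == x then s else if pvG nums i x < s then pvG nums i x else s) := rfl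
    set s' := (if i == x then s else if pvG nums i x < s then pvG nums i x else s) with hs'
    obtain ⟨h1, h2, h3⟩ := ih s'
    have hss : s' ≤ s := by
      simp only [hs']; split_ifs <;> omega
    refine ⟨by rw [step]; exact le_trans h1 hss, ?_, ?_⟩
    · intro j hj hji
      rcases List.mem_cons.mp hj with rfl | hj
      · have hix : (i == j) = false := beq_eq_false_iff_ne.mpr (fun h => hji h.symm)
        have : s' ≤ pvG nums i j := by
          simp only [hs', hix, Bool.false_eq_true, if_false]; split_ifs <;> omega
        rw [step]; exact le_trans h1 this
      · rw [step]; exact h2 j hj hji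
    · rw [step]
      rcases h3 with h3 | ⟨j, hj, hji, hEq⟩
      · by_cases hix : i = x
        · left; rw [h3]; simp [hs', hix]
        · by_cases hlt : pvG nums i x < s
          · right
            refine ⟨x, List.mem_cons_self, fun h => hix h.symm, ?_⟩
            rw [h3]; simp [hs', hix, hlt]
          · left; rw [h3]; simp [hs', hix, hlt]
      · right; exact ⟨j, List.mem_cons_of_mem _ hj, hji, hEq⟩

lemma pv_outer_spec (nums : List Int) (l : List Int) (s : Int) :
    pvOuter nums l s ≤ s ∧
    (∀ i ∈ l, ∀ j ∈ PySem.List.pyRange 0 (nums.length : Int) 1, j ≠ i →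
      pvOuter nums l s ≤ pvG nums i j) ∧
    (pvOuter nums l s = s ∨ ∃ i ∈ l, ∃ j ∈ PySem.List.pyRange 0 (nums.length : Int) 1,
      j ≠ i ∧ pvOuter nums l s = pvG nums i j) := by
  induction l generalizing s with
  | nil => simp [pvOuter]
  | cons x t ih =>
    have step : pvOuter nums (x :: t) s
        = pvOuter nums t (pvInner nums x (PySem.List.pyRange 0 (nums.length : Int) 1) s) := rfl
    set s' := pvInner nums x (PySem.List.pyRange 0 (nums.length : Int) 1) s with hs'
    obtain ⟨g1, g2, g3⟩ := pv_inner_spec nums x (PySem.List.pyRange 0 (nums.length : Int) 1) s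
    obtain ⟨h1, h2, h3⟩ := ih s'
    refine ⟨by rw [step]; exact le_trans h1 g1, ?_, ?_⟩
    · intro i hi j hj hji
      rcases List.mem_cons.mp hi with rfl | hi
      · rw [step]; exact le_trans h1 (g2 j hj hji)
      · rw [step]; exact h2 i hi j hj hji
    · rw [step]
      rcases h3 with h3 | ⟨i, hi, j, hj, hji, hEq⟩
      · rcases g3 with g3 | ⟨j, hj, hji, gEq⟩
        · left; rw [h3, hs']; exact g3
        · right; exact ⟨x, List.mem_cons_self, j, hj, hji, by rw [h3, hs']; exact gEq⟩
      · right; exact ⟨i, List.mem_cons_of_mem _ hi, j, hj, hji, hEq⟩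

-- pvG at in-range Nat indices is the product of the list entries
lemma pv_G_eq (nums : List Int) (i j : Nat) (hi : i < nums.length) (hj : j < nums.length) :
    pvG nums (i : Int) (j : Int) = nums[j] * nums[i] := by
  simp [pvG, hi, hj]

-- A is at most its 2^31 sentinel
lemma pv_A_le_init (nums : List Int) : get_minimum_sum nums ≤ 2 ^ 31 := by
  rw [pv_A_eq_outer]; exact (pv_outer_spec nums _ _).1

-- A is at most every product over distinct indices
lemma pv_A_le_pair (nums : List Int) (i j : Nat) (hi : i < nums.length) (hj : j < nums.length)
    (hij : i ≠ j) : get_minimum_sum nums ≤ nums[j] * nums[i] := by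
  rw [pv_A_eq_outer, ← pv_G_eq nums i j hi hj]
  refine (pv_outer_spec nums _ _).2.1 (i : Int) ?_ (j : Int) ?_ ?_
  · rw [PySem.List.mem_pyRange_one]; omega
  · rw [PySem.List.mem_pyRange_one]; omega
  · exact fun h => hij (by exact_mod_cast h.symm)

-- A equals its sentinel or some product over distinct indices
lemma pv_A_cases (nums : List Int) :
    get_minimum_sum nums = 2 ^ 31 ∨
    ∃ i j : Nat, ∃ hi : i < nums.length, ∃ hj : j < nums.length, i ≠ j ∧
      get_minimum_sum nums = nums[j] * nums[i] := by
  rw [pv_A_eq_outer]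
  rcases (pv_outer_spec nums _ _).2.2 with h | ⟨i, hi, j, hj, hji, hEq⟩
  · exact Or.inl h
  · rw [PySem.List.mem_pyRange_one] at hi hj
    refine Or.inr ⟨i.toNat, j.toNat, by omega, by omega, by omega, ?_⟩
    rw [hEq, ← pv_G_eq nums i.toNat j.toNat (by omega) (by omega)]
    congr 1 <;> omega

-- two distinct positions carrying given values transfer across a permutation
lemma pv_pair_transfer {l l' : List Int} (h : l.Perm l') (i j : Fin l.length) (hij : i ≠ j) :
    ∃ p q : Fin l'.length, p ≠ q ∧ l'.get p = l.get i ∧ l'.get q = l.get j := by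
  by_cases hv : l.get i = l.get j
  · have hdup : l.Duplicate (l.get i) := by
      rw [List.duplicate_iff_exists_distinct_get]
      rcases lt_or_gt_of_ne (Fin.val_ne_of_ne hij) with hlt | hlt
      · exact ⟨i, j, hlt, rfl, hv⟩
      · exact ⟨j, i, hlt, hv, rfl⟩
    have hdup' : l'.Duplicate (l.get i) := by
      rw [List.duplicate_iff_two_le_count] at hdup ⊢
      rwa [← h.count_eq]
    obtain ⟨p, q, hpq, e1, e2⟩ := List.duplicate_iff_exists_distinct_get.mp hdup'
    exact ⟨p, q, Fin.ne_of_lt hpq, e1.symm, by rw [← hv]; exact e2.symm⟩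
  · obtain ⟨p, hp⟩ := List.mem_iff_get.mp (h.mem_iff.mp (l.get_mem i))
    obtain ⟨q, hq⟩ := List.mem_iff_get.mp (h.mem_iff.mp (l.get_mem j))
    refine ⟨p, q, ?_, hp, hq⟩
    intro hEq; apply hv; rw [← hp, ← hq, hEq]

-- monotone access into a ≤-pairwise list
lemma pv_mono {s : List Int} (hs : List.Pairwise (· ≤ ·) s) {p q : Nat} (hpq : p ≤ q)
    (hq : q < s.length) : s[p]'(by omega) ≤ s[q] := by
  rcases Nat.lt_or_ge p q with hlt | hge
  · exact List.pairwise_iff_getElem.mp hs p q (by omega) hq hlt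
  · have : p = q := by omega
    subst this; exact le_refl _

-- one-variable linear interpolation: c*v lies above one endpoint product
lemma pv_lin {c a b v : Int} (h1 : a ≤ v) (h2 : v ≤ b) : min (c * a) (c * b) ≤ c * v := by
  rcases le_total 0 c with hc | hc
  · exact le_trans (min_le_left _ _) (by nlinarith)
  · exact le_trans (min_le_right _ _) (by nlinarith)

-- abstract form of the extreme-pair bound: a ≤ b ≤ c ≤ d, x ∈ [a,c], y ∈ [b,d]
lemma pv_corner_arith {a b c d x y : Int} (hab : a ≤ b) (hbc : b ≤ c) (hcd : c ≤ d)
    (hax : a ≤ x) (hxc : x ≤ c) (hby : b ≤ y) (hyd : y ≤ d) :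
    min (min (a * b) (d * c)) (a * d) ≤ x * y := by
  have h1 : min (y * a) (y * c) ≤ y * x := pv_lin hax hxc
  have h2 : min (a * b) (a * d) ≤ a * y := pv_lin hby hyd
  have h3 : min (c * b) (c * d) ≤ c * y := pv_lin hby hyd
  have h4 : min (b * a) (b * d) ≤ b * c := pv_lin (le_trans hab hbc) hcd
  have h5 : min (d * a) (d * c) ≤ d * b := pv_lin hab hbc
  rw [mul_comm y a, mul_comm y c, mul_comm y x] at h1
  rw [mul_comm c b] at h3
  rw [mul_comm b a] at h4
  rw [mul_comm d a, mul_comm d c, mul_comm d b] at h5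
  rw [mul_comm d c]
  have hM1 : min (min (a * b) (c * d)) (a * d) ≤ a * b := le_trans (min_le_left _ _) (min_le_left _ _)
  have hM2 : min (min (a * b) (c * d)) (a * d) ≤ c * d := le_trans (min_le_left _ _) (min_le_right _ _)
  have hM3 : min (min (a * b) (c * d)) (a * d) ≤ a * d := min_le_right _ _
  have hMbd : min (min (a * b) (c * d)) (a * d) ≤ b * d := le_trans (le_min hM3 hM2) h5
  have hMbc : min (min (a * b) (c * d)) (a * d) ≤ b * c := le_trans (le_min hM1 hMbd) h4
  exact le_trans (le_min (le_trans (le_min hM1 hM3) h2) (le_trans (le_min hMbc hM2) h3)) h1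

-- the extreme-pair products bound every distinct-index product in a sorted list (ordered case)
lemma pv_corner_lt {s : List Int} (hs : List.Pairwise (· ≤ ·) s) (h2 : 2 ≤ s.length)
    {p q : Nat} (hq : q < s.length) (hpq : p < q) :
    min (min (s[0]'(by omega) * s[1]'(by omega))
             (s[s.length - 1]'(by omega) * s[s.length - 2]'(by omega)))
        (s[0]'(by omega) * s[s.length - 1]'(by omega))
      ≤ s[p]'(by omega) * s[q] := by
  by_cases hn : s.length = 2
  · have hp0 : p = 0 := by omega
    have hq1 : q = 1 := by omega
    subst hp0 hq1
    have e1 : s.length - 1 = 1 := by omega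
    have e2 : s.length - 2 = 0 := by omega
    simp only [e1, e2]
    exact le_trans (min_le_right _ _) (le_refl _)
  · have h3 : 3 ≤ s.length := by omega
    exact pv_corner_arith
      (pv_mono hs (by omega) (by omega)) (pv_mono hs (by omega) (by omega))
      (pv_mono hs (by omega) (by omega)) (pv_mono hs (by omega) (by omega))
      (pv_mono hs (by omega) (by omega)) (pv_mono hs (by omega) (by omega))
      (pv_mono hs (by omega) (by omega))

-- the unordered version, by commutativity
lemma pv_corner {s : List Int} (hs : List.Pairwise (· ≤ ·) s) (h2 : 2 ≤ s.length)
    {p q : Nat} (hp : p < s.length) (hq : q < s.length) (hpq : p ≠ q) :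
    min (min (s[0]'(by omega) * s[1]'(by omega))
             (s[s.length - 1]'(by omega) * s[s.length - 2]'(by omega)))
        (s[0]'(by omega) * s[s.length - 1]'(by omega))
      ≤ s[p] * s[q] := by
  rcases Nat.lt_or_ge p q with hlt | hge
  · exact pv_corner_lt hs h2 hq hlt
  · have hlt : q < p := by omega
    rw [mul_comm (s[p]'hp) (s[q]'hq)]
    exact pv_corner_lt hs h2 hp hlt

-- dropping the sentinel from a four-way min only increases it
lemma pv_min4_le {w u v z : Int} : min (min (min w u) v) z ≤ min (min u v) z := by omega

-- B's value, spelled out with getElem, when the list has at least two entries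
lemma pv_B_eq (nums : List Int) (h2 : 2 ≤ nums.length) :
    get_minimum_sum_alt nums
      = min (min (min ((2:Int) ^ 31)
            ((pvS nums)[0]'(by rw [pvS, PySem.List.length_sorted]; omega)
              * (pvS nums)[1]'(by rw [pvS, PySem.List.length_sorted]; omega)))
          ((pvS nums)[(pvS nums).length - 1]'(by rw [pvS, PySem.List.length_sorted]; omega)
              * (pvS nums)[(pvS nums).length - 2]'(by rw [pvS, PySem.List.length_sorted]; omega)))
        ((pvS nums)[0]'(by rw [pvS, PySem.List.length_sorted]; omega)
              * (pvS nums)[(pvS nums).length - 1]'(by rw [pvS, PySem.List.length_sorted]; omega)) := by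
  have hl : (pvS nums).length = nums.length := PySem.List.length_sorted nums (fun x => x) false
  have hl2 : 2 ≤ (pvS nums).length := by omega
  rw [get_minimum_sum_alt, if_neg (by omega)]
  show min (min (min (2 ^ 31) (PySem.List.pyGetD (pvS nums) 0 0 * PySem.List.pyGetD (pvS nums) 1 0))
             (PySem.List.pyGetD (pvS nums) (-1) 0 * PySem.List.pyGetD (pvS nums) (-2) 0))
        (PySem.List.pyGetD (pvS nums) 0 0 * PySem.List.pyGetD (pvS nums) (-1) 0) = _
  have e1 : PySem.List.pyGetD (pvS nums) (-1) 0 = (pvS nums)[(pvS nums).length - 1]'(by omega) :=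
    PySem.List.pyGetD_neg_ofNat _ 1 0 (by omega) (by omega)
  have e2 : PySem.List.pyGetD (pvS nums) (-2) 0 = (pvS nums)[(pvS nums).length - 2]'(by omega) :=
    PySem.List.pyGetD_neg_ofNat _ 2 0 (by omega) (by omega)
  have e3 : PySem.List.pyGetD (pvS nums) 0 0 = (pvS nums)[0]'(by omega) := by
    simp [pysem]; rw [List.getElem?_eq_getElem (by omega)]; rfl
  have e4 : PySem.List.pyGetD (pvS nums) 1 0 = (pvS nums)[1]'(by omega) := by
    simp [pysem]; rw [List.getElem?_eq_getElem (by omega)]; rfl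
  rw [e1, e2, e3, e4]

-- ===== VERDICT (by name: the statement is the Claim_ definition above) =====
theorem get_minimum_sum_spec : Claim_equal_get_minimum_sum := by
  unfold Claim_equal_get_minimum_sum
  intro nums _
  unfold Spec_get_minimum_sum
  by_cases hn : nums.length < 2
  · have hB : get_minimum_sum_alt nums = 2 ^ 31 := by
      rw [get_minimum_sum_alt, if_pos hn]
    rw [hB]
    rcases nums with _ | ⟨x, _ | ⟨y, t⟩⟩
    · simp [get_minimum_sum, pysem]
    · simp [get_minimum_sum, pysem]
    · simp at hn
  · push Not at hn
    have hl : (pvS nums).length = nums.length := PySem.List.length_sorted nums (fun x => x) false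
    have hperm : (pvS nums).Perm nums := PySem.List.sorted_perm nums (fun x => x) false
    have hpw : List.Pairwise (· ≤ ·) (pvS nums) := PySem.List.sorted_pairwise nums (fun x => x)
    have hl2 : 2 ≤ (pvS nums).length := by omega
    rw [pv_B_eq nums hn]
    apply le_antisymm
    · -- A ≤ each of the four entries of B's min
      have cand : ∀ p q : Fin (pvS nums).length, p ≠ q →
          get_minimum_sum nums ≤ (pvS nums).get p * (pvS nums).get q := by
        intro p q hpq
        obtain ⟨i, j, hij, e1, e2⟩ := pv_pair_transfer hperm p q hpq
        rw [← e1, ← e2]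
        simp only [List.get_eq_getElem]
        exact pv_A_le_pair nums j.val i.val j.isLt i.isLt (Fin.val_ne_of_ne hij.symm)
      refine le_min (le_min (le_min (pv_A_le_init nums) ?_) ?_) ?_
      · exact cand ⟨0, by omega⟩ ⟨1, by omega⟩ (by simp [Fin.ext_iff]; try omega)
      · exact cand ⟨(pvS nums).length - 1, by omega⟩ ⟨(pvS nums).length - 2, by omega⟩
          (by simp [Fin.ext_iff]; try omega)
      · exact cand ⟨0, by omega⟩ ⟨(pvS nums).length - 1, by omega⟩
          (by simp [Fin.ext_iff]; try omega)
    · rcases pv_A_cases nums with hA | ⟨i, j, hi, hj, hij, hA⟩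
      · rw [hA]
        exact le_trans (min_le_left _ _) (le_trans (min_le_left _ _) (min_le_left _ _))
      · rw [hA]
        obtain ⟨p, q, hpq, e1, e2⟩ :=
          pv_pair_transfer hperm.symm ⟨j, hj⟩ ⟨i, hi⟩ (Fin.ne_of_val_ne hij.symm)
        simp only [List.get_eq_getElem] at e1 e2
        rw [← e1, ← e2]
        exact le_trans pv_min4_le
          (pv_corner hpw hl2 p.isLt q.isLt (Fin.val_ne_of_ne hpq))
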